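-- pv_equiv track=rewrite | github.com/gold-silver-copper/InterSlavic-Universal-Dependencies | isv_nlp_utils/slovnik.py | infer_pos
-- ===== SOURCE A (Python) =====
-- def infer_pos(details_string):
--     arr = [
--         x for x in details_string
--         .replace("./", '/')
--         .replace(" ", '')
--         .split('.')
--         if x != ''
--     ]
--
--     if 'adj' in arr:
--         return 'adj'
--     if set(arr) & {'f', 'n', 'm', 'm/f'}:
--         return 'noun'
--     if 'adv' in arr:
--         return 'adv'
--     if 'conj' in arr:
--         return 'conj'
--     if 'prep' in arr:
--         return 'prep'
--     if 'pron' in arr: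
--         return 'pron'
--     if 'num' in arr:
--         return 'num'
--     if 'intj' in arr:
--         return 'interjection'
--     if 'v' in arr:
--         return 'verb'
-- ===== SOURCE B (Python) =====
-- _PRIO = {'adj': (0, 'adj'), 'f': (1, 'noun'), 'n': (1, 'noun'), 'm': (1, 'noun'),
--          'm/f': (1, 'noun'), 'adv': (2, 'adv'), 'conj': (3, 'conj'),
--          'prep': (4, 'prep'), 'pron': (5, 'pron'), 'num': (6, 'num'),
--          'intj': (7, 'interjection'), 'v': (8, 'verb')}
--
--
-- def infer_pos(details_string):
--     cleaned = details_string.replace("./", "/").replace(" ", "")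
--     best = None
--     for token in cleaned.split('.'):
--         entry = _PRIO.get(token)
--         if entry is not None and (best is None or entry[0] < best[0]):
--             best = entry
--     return None if best is None else best[1]
-- ===== Notes on version B (the rewrite author's own statement) =====
-- stated objective: alternative
-- what changed: Instead of nine sequential membership scans over the token list, B makes a single pass over the tokens, looking each one up in a priority dictionary and keeping the minimum-priority entry seen; the label of that entry is the answer.
import Mathlib
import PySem

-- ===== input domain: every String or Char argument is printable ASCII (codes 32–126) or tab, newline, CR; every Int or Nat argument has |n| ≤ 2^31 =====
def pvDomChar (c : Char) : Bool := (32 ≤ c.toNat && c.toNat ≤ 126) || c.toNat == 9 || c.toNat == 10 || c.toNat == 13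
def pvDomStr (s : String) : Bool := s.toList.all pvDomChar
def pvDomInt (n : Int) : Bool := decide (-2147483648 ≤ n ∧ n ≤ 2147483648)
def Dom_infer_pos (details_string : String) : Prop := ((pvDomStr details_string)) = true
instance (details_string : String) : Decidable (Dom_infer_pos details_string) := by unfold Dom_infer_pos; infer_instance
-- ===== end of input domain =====

-- B replaces A's nine sequential membership scans over the token list by a single pass
-- that keeps the minimum-priority entry found in a priority dictionary (objective: alternative).

-- ===== PORT A =====
def infer_pos (details_string : String) : Option String :=
  let arr :=
    ((PySem.Str.split?
      (PySem.Str.replace (PySem.Str.replace details_string "./" "/") " " "")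
      ".").getD []).filter (fun x => x ≠ "")
  if arr.contains "adj" then some "adj"
  else if PySem.Set.inter (PySem.Set.ofList arr) (PySem.Set.ofList ["f", "n", "m", "m/f"]) ≠ [] then some "noun"
  else if arr.contains "adv" then some "adv"
  else if arr.contains "conj" then some "conj"
  else if arr.contains "prep" then some "prep"
  else if arr.contains "pron" then some "pron"
  else if arr.contains "num" then some "num"
  else if arr.contains "intj" then some "interjection"
  else if arr.contains "v" then some "verb"
  else none

-- ===== PORT B =====
-- the _PRIO dictionary of Source B (token -> (priority, label))
def pvPrioL : List (String × (Int × String)) :=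
    [("adj", (0, "adj")), ("f", (1, "noun")), ("n", (1, "noun")), ("m", (1, "noun")),
     ("m/f", (1, "noun")), ("adv", (2, "adv")), ("conj", (3, "conj")),
     ("prep", (4, "prep")), ("pron", (5, "pron")), ("num", (6, "num")),
     ("intj", (7, "interjection")), ("v", (8, "verb"))]

def pvPrio : PySem.Dict String (Int × String) := PySem.Dict.ofList pvPrioL

-- one iteration of Source B's loop: look the token up, keep the lower-priority entry
def pvStep (best : Option (Int × String)) (token : String) : Option (Int × String) :=
  match PySem.Dict.get? pvPrio token with
  | none => best
  | some e =>
    match best with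
    | none => some e
    | some b => if e.1 < b.1 then some e else best


def infer_pos_alt (details_string : String) : Option String :=
  let cleaned := PySem.Str.replace (PySem.Str.replace details_string "./" "/") " " ""
  match ((PySem.Str.split? cleaned ".").getD []).foldl pvStep none with
  | none => none
  | some b => some b.2

-- ===== PRECONDITION & SPEC =====
def Spec_infer_pos (details_string : String) (out : Option String) : Prop := out = infer_pos_alt details_string
instance (details_string : String) (out : Option String) : Decidable (Spec_infer_pos details_string out) := by unfold Spec_infer_pos; infer_instance

-- ===== CLAIM (what is proved, stated in full; the proofs are below) =====
def Claim_equal_infer_pos : Prop := ∀ (details_string : String), Dom_infer_pos details_string → Spec_infer_pos details_string (infer_pos details_string)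

-- ===== LEMMAS AND PROOFS =====

lemma pvPrio_eq : pvPrio = PySem.Dict.mk pvPrioL := by decide
lemma prio_cases (t : String) (e : Int × String) (h : PySem.Dict.get? pvPrio t = some e) :
    (t, e) ∈ pvPrioL := by
  rw [pvPrio_eq] at h
  simp only [pvPrioL, PySem.Dict.get?_mk_cons] at h
  by_cases h1 : ("adj" == t) = true
  · rw [if_pos h1] at h; cases eq_of_beq h1; cases h; decide
  rw [if_neg h1] at h
  by_cases h2 : ("f" == t) = true
  · rw [if_pos h2] at h; cases eq_of_beq h2; cases h; decide
  rw [if_neg h2] at h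
  by_cases h3 : ("n" == t) = true
  · rw [if_pos h3] at h; cases eq_of_beq h3; cases h; decide
  rw [if_neg h3] at h
  by_cases h4 : ("m" == t) = true
  · rw [if_pos h4] at h; cases eq_of_beq h4; cases h; decide
  rw [if_neg h4] at h
  by_cases h5 : ("m/f" == t) = true
  · rw [if_pos h5] at h; cases eq_of_beq h5; cases h; decide
  rw [if_neg h5] at h
  by_cases h6 : ("adv" == t) = true
  · rw [if_pos h6] at h; cases eq_of_beq h6; cases h; decide
  rw [if_neg h6] at h
  by_cases h7 : ("conj" == t) = true
  · rw [if_pos h7] at h; cases eq_of_beq h7; cases h; decide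
  rw [if_neg h7] at h
  by_cases h8 : ("prep" == t) = true
  · rw [if_pos h8] at h; cases eq_of_beq h8; cases h; decide
  rw [if_neg h8] at h
  by_cases h9 : ("pron" == t) = true
  · rw [if_pos h9] at h; cases eq_of_beq h9; cases h; decide
  rw [if_neg h9] at h
  by_cases h10 : ("num" == t) = true
  · rw [if_pos h10] at h; cases eq_of_beq h10; cases h; decide
  rw [if_neg h10] at h
  by_cases h11 : ("intj" == t) = true
  · rw [if_pos h11] at h; cases eq_of_beq h11; cases h; decide
  rw [if_neg h11] at h
  by_cases h12 : ("v" == t) = true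
  · rw [if_pos h12] at h; cases eq_of_beq h12; cases h; decide
  rw [if_neg h12] at h
  simp [PySem.Dict.get?] at h


lemma pvStep_eq_none (acc : Option (Int × String)) (t : String) :
    pvStep acc t = none ↔ acc = none ∧ PySem.Dict.get? pvPrio t = none := by
  rcases hp : PySem.Dict.get? pvPrio t with _ | e' <;>
    rcases acc with _ | b <;> simp only [pvStep, hp]
  · simp
  · simp
  · simp
  · split_ifs <;> simp

lemma pvStep_some_cases (acc : Option (Int × String)) (t : String) (e : Int × String)
    (h : pvStep acc t = some e) :
    acc = some e ∨ PySem.Dict.get? pvPrio t = some e := by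
  rcases hp : PySem.Dict.get? pvPrio t with _ | e' <;>
    rcases acc with _ | b <;> simp only [pvStep, hp] at h
  · exact absurd h (by simp)
  · exact .inl h
  · exact .inr h
  · split_ifs at h
    · exact .inr h
    · exact .inl h

lemma pvStep_bound_acc (acc : Option (Int × String)) (t : String) (a : Int × String)
    (ha : acc = some a) : ∃ r, pvStep acc t = some r ∧ r.1 ≤ a.1 := by
  subst ha
  rcases hp : PySem.Dict.get? pvPrio t with _ | e'
  · exact ⟨a, by simp only [pvStep, hp], le_refl _⟩
  · by_cases hlt : e'.1 < a.1
    · exact ⟨e', by simp only [pvStep, hp]; rw [if_pos hlt], le_of_lt hlt⟩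
    · exact ⟨a, by simp only [pvStep, hp]; rw [if_neg hlt], le_refl _⟩

lemma pvStep_bound_prio (acc : Option (Int × String)) (t : String) (e' : Int × String)
    (hp : PySem.Dict.get? pvPrio t = some e') : ∃ r, pvStep acc t = some r ∧ r.1 ≤ e'.1 := by
  rcases acc with _ | b
  · exact ⟨e', by simp only [pvStep, hp], le_refl _⟩
  · by_cases hlt : e'.1 < b.1
    · exact ⟨e', by simp only [pvStep, hp]; rw [if_pos hlt], le_refl _⟩
    · exact ⟨b, by simp only [pvStep, hp]; rw [if_neg hlt], le_of_not_gt hlt⟩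

lemma fold_none (l : List String) :
    ∀ acc, l.foldl pvStep acc = none ↔ acc = none ∧ ∀ t ∈ l, PySem.Dict.get? pvPrio t = none := by
  induction l with
  | nil => intro acc; simp
  | cons t l ih =>
    intro acc
    rw [List.foldl_cons, ih, pvStep_eq_none]
    constructor
    · rintro ⟨⟨h1, h2⟩, h3⟩
      exact ⟨h1, fun t' ht' => by rcases List.mem_cons.mp ht' with rfl | ht'; exact h2; exact h3 t' ht'⟩
    · rintro ⟨h1, h2⟩
      exact ⟨⟨h1, h2 t (List.mem_cons_self ..)⟩, fun t' ht' => h2 t' (List.mem_cons_of_mem _ ht')⟩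

lemma fold_mem (l : List String) :
    ∀ acc e, l.foldl pvStep acc = some e →
      acc = some e ∨ ∃ t ∈ l, PySem.Dict.get? pvPrio t = some e := by
  induction l with
  | nil => intro acc e h; exact .inl h
  | cons t l ih =>
    intro acc e h
    rw [List.foldl_cons] at h
    rcases ih _ e h with h' | ⟨t', ht', hp⟩
    · rcases pvStep_some_cases acc t e h' with h'' | h''
      · exact .inl h''
      · exact .inr ⟨t, List.mem_cons_self .., h''⟩
    · exact .inr ⟨t', List.mem_cons_of_mem _ ht', hp⟩

lemma fold_min (l : List String) :
    ∀ acc e, l.foldl pvStep acc = some e →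
      (∀ a, acc = some a → e.1 ≤ a.1) ∧
      (∀ t ∈ l, ∀ e', PySem.Dict.get? pvPrio t = some e' → e.1 ≤ e'.1) := by
  induction l with
  | nil =>
    intro acc e h
    refine ⟨fun a ha => ?_, fun t ht => absurd ht (List.not_mem_nil)⟩
    rw [ha] at h; cases h; exact le_refl _
  | cons t l ih =>
    intro acc e h
    rw [List.foldl_cons] at h
    obtain ⟨ihacc, ihl⟩ := ih _ e h
    constructor
    · intro a ha
      obtain ⟨r, hr, hle⟩ := pvStep_bound_acc acc t a ha
      exact le_trans (ihacc r hr) hle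
    · intro t' ht' e' hp'
      rcases List.mem_cons.mp ht' with rfl | ht'
      · obtain ⟨r, hr, hle⟩ := pvStep_bound_prio acc t' e' hp'
        exact le_trans (ihacc r hr) hle
      · exact ihl t' ht' e' hp'

def pvCasc (arr : List String) : Option String :=
  if arr.contains "adj" then some "adj"
  else if PySem.Set.inter (PySem.Set.ofList arr) (PySem.Set.ofList ["f", "n", "m", "m/f"]) ≠ [] then some "noun"
  else if arr.contains "adv" then some "adv"
  else if arr.contains "conj" then some "conj"
  else if arr.contains "prep" then some "prep"
  else if arr.contains "pron" then some "pron"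
  else if arr.contains "num" then some "num"
  else if arr.contains "intj" then some "interjection"
  else if arr.contains "v" then some "verb"
  else none

lemma inter_ne_nil_iff {α : Type} [BEq α] [LawfulBEq α] (s t : List α) :
    PySem.Set.inter (PySem.Set.ofList s) (PySem.Set.ofList t) ≠ [] ↔ ∃ x, x ∈ s ∧ x ∈ t := by
  rw [← List.isEmpty_eq_false_iff, List.isEmpty_eq_false_iff_exists_mem]
  constructor
  · rintro ⟨x, hx⟩
    have := (PySem.Set.mem_inter _ _ _).mp hx
    exact ⟨x, (PySem.Set.mem_ofList ..).mp this.1, (PySem.Set.mem_ofList ..).mp this.2⟩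
  · rintro ⟨x, h1, h2⟩
    exact ⟨x, (PySem.Set.mem_inter _ _ _).mpr ⟨(PySem.Set.mem_ofList ..).mpr h1, (PySem.Set.mem_ofList ..).mpr h2⟩⟩

lemma contains_filter_true (l : List String) (k : String) (hk : k ∈ l) (hne : k ≠ "") :
    (l.filter (fun x => x ≠ "")).contains k = true := by
  simp [List.mem_filter, hk, hne]

lemma contains_filter_false (l : List String) (k : String) (nk : k ∉ l) :
    ¬ ((l.filter (fun x => x ≠ "")).contains k = true) := by
  simp [List.mem_filter]
  intro h
  exact absurd h nk

lemma noun_cond_true (l : List String) (k : String) (hk : k ∈ l)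
    (hne : k ≠ "") (hmem : k ∈ ["f", "n", "m", "m/f"]) :
    PySem.Set.inter (PySem.Set.ofList (l.filter (fun x => x ≠ ""))) (PySem.Set.ofList ["f", "n", "m", "m/f"]) ≠ [] :=
  (inter_ne_nil_iff _ _).mpr ⟨k, List.mem_filter.mpr ⟨hk, by simp [hne]⟩, hmem⟩

lemma noun_cond_false (l : List String) (nf : "f" ∉ l) (nn : "n" ∉ l) (nm : "m" ∉ l) (nmf : "m/f" ∉ l) :
    ¬ (PySem.Set.inter (PySem.Set.ofList (l.filter (fun x => x ≠ ""))) (PySem.Set.ofList ["f", "n", "m", "m/f"]) ≠ []) := by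
  intro hne
  obtain ⟨x, hxa, hxk⟩ := (inter_ne_nil_iff _ _).mp hne
  have hxl := (List.mem_filter.mp hxa).1
  simp only [List.mem_cons, List.not_mem_nil, or_false] at hxk
  rcases hxk with rfl | rfl | rfl | rfl
  · exact nf hxl
  · exact nn hxl
  · exact nm hxl
  · exact nmf hxl

lemma casc_eq_fold (l : List String) :
    pvCasc (l.filter (fun x => x ≠ "")) =
      (match l.foldl pvStep none with | none => none | some b => some b.2) := by
  unfold pvCasc
  rcases hf : l.foldl pvStep none with _ | e
  · obtain ⟨-, hall⟩ := (fold_none l none).mp hf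
    have n1 : "adj" ∉ l := fun hk => by
      have h := hall _ hk
      rw [show PySem.Dict.get? pvPrio "adj" = some ((0 : Int), "adj") from by decide] at h
      cases h
    have n2 : "f" ∉ l := fun hk => by
      have h := hall _ hk
      rw [show PySem.Dict.get? pvPrio "f" = some ((1 : Int), "noun") from by decide] at h
      cases h
    have n3 : "n" ∉ l := fun hk => by
      have h := hall _ hk
      rw [show PySem.Dict.get? pvPrio "n" = some ((1 : Int), "noun") from by decide] at h
      cases h
    have n4 : "m" ∉ l := fun hk => by
      have h := hall _ hk
      rw [show PySem.Dict.get? pvPrio "m" = some ((1 : Int), "noun") from by decide] at h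
      cases h
    have n5 : "m/f" ∉ l := fun hk => by
      have h := hall _ hk
      rw [show PySem.Dict.get? pvPrio "m/f" = some ((1 : Int), "noun") from by decide] at h
      cases h
    have n6 : "adv" ∉ l := fun hk => by
      have h := hall _ hk
      rw [show PySem.Dict.get? pvPrio "adv" = some ((2 : Int), "adv") from by decide] at h
      cases h
    have n7 : "conj" ∉ l := fun hk => by
      have h := hall _ hk
      rw [show PySem.Dict.get? pvPrio "conj" = some ((3 : Int), "conj") from by decide] at h
      cases h
    have n8 : "prep" ∉ l := fun hk => by
      have h := hall _ hk
      rw [show PySem.Dict.get? pvPrio "prep" = some ((4 : Int), "prep") from by decide] at h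
      cases h
    have n9 : "pron" ∉ l := fun hk => by
      have h := hall _ hk
      rw [show PySem.Dict.get? pvPrio "pron" = some ((5 : Int), "pron") from by decide] at h
      cases h
    have n10 : "num" ∉ l := fun hk => by
      have h := hall _ hk
      rw [show PySem.Dict.get? pvPrio "num" = some ((6 : Int), "num") from by decide] at h
      cases h
    have n11 : "intj" ∉ l := fun hk => by
      have h := hall _ hk
      rw [show PySem.Dict.get? pvPrio "intj" = some ((7 : Int), "interjection") from by decide] at h
      cases h
    have n12 : "v" ∉ l := fun hk => by
      have h := hall _ hk
      rw [show PySem.Dict.get? pvPrio "v" = some ((8 : Int), "verb") from by decide] at h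
      cases h
    rw [if_neg (contains_filter_false l "adj" n1), if_neg (noun_cond_false l n2 n3 n4 n5), if_neg (contains_filter_false l "adv" n6), if_neg (contains_filter_false l "conj" n7), if_neg (contains_filter_false l "prep" n8), if_neg (contains_filter_false l "pron" n9), if_neg (contains_filter_false l "num" n10), if_neg (contains_filter_false l "intj" n11), if_neg (contains_filter_false l "v" n12)]
  · have hmin := (fold_min l none e hf).2
    rcases fold_mem l none e hf with h' | ⟨t, htl, hpt⟩
    · cases h'
    have habs : ∀ (k : String) (ek : Int × String), PySem.Dict.get? pvPrio k = some ek →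
        ek.1 < e.1 → k ∉ l := fun k ek hk hlt hkm => by
      have := hmin k hkm ek hk
      omega
    have hc := prio_cases t e hpt
    simp only [pvPrioL, List.mem_cons, List.not_mem_nil, or_false, Prod.mk.injEq] at hc
    rcases hc with ⟨rfl, rfl⟩ | ⟨rfl, rfl⟩ | ⟨rfl, rfl⟩ | ⟨rfl, rfl⟩ | ⟨rfl, rfl⟩ | ⟨rfl, rfl⟩ | ⟨rfl, rfl⟩ | ⟨rfl, rfl⟩ | ⟨rfl, rfl⟩ | ⟨rfl, rfl⟩ | ⟨rfl, rfl⟩ | ⟨rfl, rfl⟩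
    · rw [if_pos (contains_filter_true l "adj" htl (by decide))]
    · have m1 : "adj" ∉ l := habs "adj" ((0 : Int), "adj") (by decide) (by decide)
      rw [if_neg (contains_filter_false l "adj" m1), if_pos (noun_cond_true l "f" htl (by decide) (by decide))]
    · have m1 : "adj" ∉ l := habs "adj" ((0 : Int), "adj") (by decide) (by decide)
      rw [if_neg (contains_filter_false l "adj" m1), if_pos (noun_cond_true l "n" htl (by decide) (by decide))]
    · have m1 : "adj" ∉ l := habs "adj" ((0 : Int), "adj") (by decide) (by decide)
      rw [if_neg (contains_filter_false l "adj" m1), if_pos (noun_cond_true l "m" htl (by decide) (by decide))]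
    · have m1 : "adj" ∉ l := habs "adj" ((0 : Int), "adj") (by decide) (by decide)
      rw [if_neg (contains_filter_false l "adj" m1), if_pos (noun_cond_true l "m/f" htl (by decide) (by decide))]
    · have m1 : "adj" ∉ l := habs "adj" ((0 : Int), "adj") (by decide) (by decide)
      have m2 : "f" ∉ l := habs "f" ((1 : Int), "noun") (by decide) (by decide)
      have m3 : "n" ∉ l := habs "n" ((1 : Int), "noun") (by decide) (by decide)
      have m4 : "m" ∉ l := habs "m" ((1 : Int), "noun") (by decide) (by decide)
      have m5 : "m/f" ∉ l := habs "m/f" ((1 : Int), "noun") (by decide) (by decide)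
      rw [if_neg (contains_filter_false l "adj" m1), if_neg (noun_cond_false l m2 m3 m4 m5), if_pos (contains_filter_true l "adv" htl (by decide))]
    · have m1 : "adj" ∉ l := habs "adj" ((0 : Int), "adj") (by decide) (by decide)
      have m2 : "f" ∉ l := habs "f" ((1 : Int), "noun") (by decide) (by decide)
      have m3 : "n" ∉ l := habs "n" ((1 : Int), "noun") (by decide) (by decide)
      have m4 : "m" ∉ l := habs "m" ((1 : Int), "noun") (by decide) (by decide)
      have m5 : "m/f" ∉ l := habs "m/f" ((1 : Int), "noun") (by decide) (by decide)
      have m6 : "adv" ∉ l := habs "adv" ((2 : Int), "adv") (by decide) (by decide)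
      rw [if_neg (contains_filter_false l "adj" m1), if_neg (noun_cond_false l m2 m3 m4 m5), if_neg (contains_filter_false l "adv" m6), if_pos (contains_filter_true l "conj" htl (by decide))]
    · have m1 : "adj" ∉ l := habs "adj" ((0 : Int), "adj") (by decide) (by decide)
      have m2 : "f" ∉ l := habs "f" ((1 : Int), "noun") (by decide) (by decide)
      have m3 : "n" ∉ l := habs "n" ((1 : Int), "noun") (by decide) (by decide)
      have m4 : "m" ∉ l := habs "m" ((1 : Int), "noun") (by decide) (by decide)
      have m5 : "m/f" ∉ l := habs "m/f" ((1 : Int), "noun") (by decide) (by decide)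
      have m6 : "adv" ∉ l := habs "adv" ((2 : Int), "adv") (by decide) (by decide)
      have m7 : "conj" ∉ l := habs "conj" ((3 : Int), "conj") (by decide) (by decide)
      rw [if_neg (contains_filter_false l "adj" m1), if_neg (noun_cond_false l m2 m3 m4 m5), if_neg (contains_filter_false l "adv" m6), if_neg (contains_filter_false l "conj" m7), if_pos (contains_filter_true l "prep" htl (by decide))]
    · have m1 : "adj" ∉ l := habs "adj" ((0 : Int), "adj") (by decide) (by decide)
      have m2 : "f" ∉ l := habs "f" ((1 : Int), "noun") (by decide) (by decide)
      have m3 : "n" ∉ l := habs "n" ((1 : Int), "noun") (by decide) (by decide)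
      have m4 : "m" ∉ l := habs "m" ((1 : Int), "noun") (by decide) (by decide)
      have m5 : "m/f" ∉ l := habs "m/f" ((1 : Int), "noun") (by decide) (by decide)
      have m6 : "adv" ∉ l := habs "adv" ((2 : Int), "adv") (by decide) (by decide)
      have m7 : "conj" ∉ l := habs "conj" ((3 : Int), "conj") (by decide) (by decide)
      have m8 : "prep" ∉ l := habs "prep" ((4 : Int), "prep") (by decide) (by decide)
      rw [if_neg (contains_filter_false l "adj" m1), if_neg (noun_cond_false l m2 m3 m4 m5), if_neg (contains_filter_false l "adv" m6), if_neg (contains_filter_false l "conj" m7), if_neg (contains_filter_false l "prep" m8), if_pos (contains_filter_true l "pron" htl (by decide))]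
    · have m1 : "adj" ∉ l := habs "adj" ((0 : Int), "adj") (by decide) (by decide)
      have m2 : "f" ∉ l := habs "f" ((1 : Int), "noun") (by decide) (by decide)
      have m3 : "n" ∉ l := habs "n" ((1 : Int), "noun") (by decide) (by decide)
      have m4 : "m" ∉ l := habs "m" ((1 : Int), "noun") (by decide) (by decide)
      have m5 : "m/f" ∉ l := habs "m/f" ((1 : Int), "noun") (by decide) (by decide)
      have m6 : "adv" ∉ l := habs "adv" ((2 : Int), "adv") (by decide) (by decide)
      have m7 : "conj" ∉ l := habs "conj" ((3 : Int), "conj") (by decide) (by decide)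
      have m8 : "prep" ∉ l := habs "prep" ((4 : Int), "prep") (by decide) (by decide)
      have m9 : "pron" ∉ l := habs "pron" ((5 : Int), "pron") (by decide) (by decide)
      rw [if_neg (contains_filter_false l "adj" m1), if_neg (noun_cond_false l m2 m3 m4 m5), if_neg (contains_filter_false l "adv" m6), if_neg (contains_filter_false l "conj" m7), if_neg (contains_filter_false l "prep" m8), if_neg (contains_filter_false l "pron" m9), if_pos (contains_filter_true l "num" htl (by decide))]
    · have m1 : "adj" ∉ l := habs "adj" ((0 : Int), "adj") (by decide) (by decide)
      have m2 : "f" ∉ l := habs "f" ((1 : Int), "noun") (by decide) (by decide)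
      have m3 : "n" ∉ l := habs "n" ((1 : Int), "noun") (by decide) (by decide)
      have m4 : "m" ∉ l := habs "m" ((1 : Int), "noun") (by decide) (by decide)
      have m5 : "m/f" ∉ l := habs "m/f" ((1 : Int), "noun") (by decide) (by decide)
      have m6 : "adv" ∉ l := habs "adv" ((2 : Int), "adv") (by decide) (by decide)
      have m7 : "conj" ∉ l := habs "conj" ((3 : Int), "conj") (by decide) (by decide)
      have m8 : "prep" ∉ l := habs "prep" ((4 : Int), "prep") (by decide) (by decide)
      have m9 : "pron" ∉ l := habs "pron" ((5 : Int), "pron") (by decide) (by decide)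
      have m10 : "num" ∉ l := habs "num" ((6 : Int), "num") (by decide) (by decide)
      rw [if_neg (contains_filter_false l "adj" m1), if_neg (noun_cond_false l m2 m3 m4 m5), if_neg (contains_filter_false l "adv" m6), if_neg (contains_filter_false l "conj" m7), if_neg (contains_filter_false l "prep" m8), if_neg (contains_filter_false l "pron" m9), if_neg (contains_filter_false l "num" m10), if_pos (contains_filter_true l "intj" htl (by decide))]
    · have m1 : "adj" ∉ l := habs "adj" ((0 : Int), "adj") (by decide) (by decide)
      have m2 : "f" ∉ l := habs "f" ((1 : Int), "noun") (by decide) (by decide)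
      have m3 : "n" ∉ l := habs "n" ((1 : Int), "noun") (by decide) (by decide)
      have m4 : "m" ∉ l := habs "m" ((1 : Int), "noun") (by decide) (by decide)
      have m5 : "m/f" ∉ l := habs "m/f" ((1 : Int), "noun") (by decide) (by decide)
      have m6 : "adv" ∉ l := habs "adv" ((2 : Int), "adv") (by decide) (by decide)
      have m7 : "conj" ∉ l := habs "conj" ((3 : Int), "conj") (by decide) (by decide)
      have m8 : "prep" ∉ l := habs "prep" ((4 : Int), "prep") (by decide) (by decide)
      have m9 : "pron" ∉ l := habs "pron" ((5 : Int), "pron") (by decide) (by decide)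
      have m10 : "num" ∉ l := habs "num" ((6 : Int), "num") (by decide) (by decide)
      have m11 : "intj" ∉ l := habs "intj" ((7 : Int), "interjection") (by decide) (by decide)
      rw [if_neg (contains_filter_false l "adj" m1), if_neg (noun_cond_false l m2 m3 m4 m5), if_neg (contains_filter_false l "adv" m6), if_neg (contains_filter_false l "conj" m7), if_neg (contains_filter_false l "prep" m8), if_neg (contains_filter_false l "pron" m9), if_neg (contains_filter_false l "num" m10), if_neg (contains_filter_false l "intj" m11), if_pos (contains_filter_true l "v" htl (by decide))]

-- ===== VERDICT (by name: the statement is the Claim_ definition above) =====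
theorem infer_pos_spec : Claim_equal_infer_pos := by
  intro s _
  unfold Spec_infer_pos infer_pos infer_pos_alt
  simp only []
  generalize ((PySem.Str.split? (PySem.Str.replace (PySem.Str.replace s "./" "/") " " "") ".").getD []) = l
  exact casc_eq_fold l
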